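-- pv_equiv track=rewrite | github.com/julianazacharias/code-signal-courses | fundamental-interview-preparation-with-python/05-practice-for-interviews/03-arrray-conditional-interruption.py | solution
-- ===== SOURCE A (Python) =====
-- def solution(arr, text):
--     message = ''
--     soma = 0
--     i = 0
--
--     while i < len(text) and i < len(arr):
--
--         valor_atual = abs(arr[i] - 3)
--
--         if soma + valor_atual > 30:
--             break
--
--         soma += valor_atual
--
--         if text[i].islower():
--             message += 'a' if text[i] == 'z' else chr(ord(text[i]) + 1)
--         else:
--             message += text[i]
--
--         i += 1
--
--     return message, arr[i:]
-- ===== SOURCE B (Python) =====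
-- _SHIFT = str.maketrans('abcdefghijklmnopqrstuvwxyz', 'bcdefghijklmnopqrstuvwxyza')
--
-- def solution(arr, text):
--     # Different characterization: the weights |a-3| are nonnegative, so the
--     # running sum is monotone non-decreasing; hence the stop index equals the
--     # COUNT of prefix sums that are <= 30.  No break, no conditional stop.
--     weights = [abs(a - 3) for a in arr[:len(text)]]
--     prefix = []
--     total = 0
--     for w in weights:
--         total += w
--         prefix.append(total)
--     n = sum(1 for s in prefix if s <= 30)
--     return text[:n].translate(_SHIFT), arr[n:]
-- ===== Notes on version B (the rewrite author's own statement) =====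
-- stated objective: alternative
-- what changed: B replaces A's break-on-condition while-loop with a prefix-sum characterization: it materializes the list of running sums of the nonnegative weights |a-3| (monotone, so the stop index equals the count of prefix sums <= 30), counts them, and applies the shift via a precomputed str.translate table instead of A's per-character islower/z branching.
import Mathlib
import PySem

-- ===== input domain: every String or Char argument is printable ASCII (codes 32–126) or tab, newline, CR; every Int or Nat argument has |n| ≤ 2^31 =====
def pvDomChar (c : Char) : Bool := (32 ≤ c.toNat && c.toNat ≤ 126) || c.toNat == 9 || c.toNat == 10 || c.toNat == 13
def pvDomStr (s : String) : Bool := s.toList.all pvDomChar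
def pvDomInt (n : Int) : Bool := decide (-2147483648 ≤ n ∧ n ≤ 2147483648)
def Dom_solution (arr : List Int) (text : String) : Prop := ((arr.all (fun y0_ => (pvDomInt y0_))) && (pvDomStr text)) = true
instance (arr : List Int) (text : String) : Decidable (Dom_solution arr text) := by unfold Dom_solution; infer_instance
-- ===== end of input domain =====

-- B replaces A's break-driven loop by a prefix-sum count (weights are nonnegative, so the
-- running sum is monotone and the stop index is the count of prefix sums ≤ 30) and a
-- translate-table character shift (alternative decomposition; same cost).

-- ===== PORT A =====
-- the while loop: state (message, soma), consuming text's chars and arr in step;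
-- the remaining arr at exit is exactly arr[i:]
def solLoopA : List Char → List Int → Int → String → String × List Int
  | _, [], _, msg => (msg, [])
  | [], a :: as, _, msg => (msg, a :: as)
  | c :: cs, a :: as, soma, msg =>
    let v := |a - 3|
    if soma + v > 30 then (msg, a :: as)
    else
      solLoopA cs as (soma + v)
        (if PySem.Chars.islower c then
           msg.push (if c = 'z' then 'a' else Char.ofNat (c.toNat + 1))
         else msg.push c)

def solution (arr : List Int) (text : String) : String × List Int :=
  solLoopA text.toList arr 0 ""

-- ===== PORT B =====
-- Source B's _SHIFT = str.maketrans('abc…z','bcd…a'): the table as the function it denotes;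
-- str.translate leaves characters outside the table unchanged (exact for this table)
def shiftTableB (c : Char) : Char :=
  if 'a' ≤ c ∧ c ≤ 'z' then (if c = 'z' then 'a' else Char.ofNat (c.toNat + 1)) else c

-- the for-loop building `prefix` with accumulator `total`
def prefixSumsB : List Int → Int → List Int
  | [], _ => []
  | w :: ws, total => (total + w) :: prefixSumsB ws (total + w)

def solution_alt (arr : List Int) (text : String) : String × List Int :=
  let weights := (arr.take text.toList.length).map (fun a => |a - 3|)
  let pfx := prefixSumsB weights 0
  let n := pfx.countP (fun s => s ≤ 30)          -- sum(1 for s in prefix if s <= 30)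
  (String.ofList ((text.toList.take n).map shiftTableB), arr.drop n)

-- ===== PRECONDITION & SPEC =====
def Spec_solution (arr : List Int) (text : String) (out : String × List Int) : Prop := out = solution_alt arr text
instance (arr : List Int) (text : String) (out : String × List Int) : Decidable (Spec_solution arr text out) := by unfold Spec_solution; infer_instance

-- ===== CLAIM =====
def Claim_equal_solution : Prop := ∀ (arr : List Int) (text : String), Dom_solution arr text → Spec_solution arr text (solution arr text)

-- ===== LEMMAS AND PROOFS =====

-- A's per-character branch computes exactly the translate table
theorem transform_eq (c : Char) :
    (if PySem.Chars.islower c then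
       (if c = 'z' then 'a' else Char.ofNat (c.toNat + 1))
     else c) = shiftTableB c := by
  simp only [PySem.Chars.islower, shiftTableB]
  by_cases h1 : 'a' ≤ c <;> by_cases h2 : c ≤ 'z' <;> simp [h1, h2]

-- once the running total exceeds 30 it stays above 30 (weights nonnegative), so no
-- later prefix sum is counted
theorem countP_prefixSumsB_zero (ws : List Int) :
    ∀ total : Int, (∀ w ∈ ws, 0 ≤ w) → 30 < total →
    (prefixSumsB ws total).countP (fun s => s ≤ 30) = 0 := by
  induction ws with
  | nil => intro total _ _; simp [prefixSumsB]
  | cons w ws ih =>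
    intro total hw ht
    have hw0 : 0 ≤ w := hw w (by simp)
    have h30 : 30 < total + w := by omega
    simp only [prefixSumsB, List.countP_cons]
    rw [ih (total + w) (fun x hx => hw x (by simp [hx])) h30]
    simp; omega

-- the two programs' loops compute the same pair, for any starting state
theorem solLoopA_eq (as : List Int) (cs : List Char) (soma : Int) (msg : String) :
    solLoopA cs as soma msg =
      (msg ++ String.ofList ((cs.take ((prefixSumsB ((as.take cs.length).map (fun a => |a - 3|)) soma).countP (fun s => s ≤ 30))).map shiftTableB),
       as.drop ((prefixSumsB ((as.take cs.length).map (fun a => |a - 3|)) soma).countP (fun s => s ≤ 30))) := by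
  induction as generalizing cs soma msg with
  | nil =>
    cases cs <;> simp [solLoopA, prefixSumsB]
  | cons a as ih =>
    cases cs with
    | nil => simp [solLoopA, prefixSumsB]
    | cons c cs =>
      by_cases h : soma + |a - 3| > 30
      · have hz : (prefixSumsB ((as.take cs.length).map (fun a => |a - 3|)) (soma + |a - 3|)).countP (fun s => decide (s ≤ 30)) = 0 := by
          apply countP_prefixSumsB_zero
          · intro w hw
            obtain ⟨x, -, rfl⟩ := List.mem_map.mp hw
            exact abs_nonneg _
          · omega
        have hcount : (prefixSumsB (((a :: as).take (c :: cs).length).map (fun a => |a - 3|)) soma).countP (fun s => decide (s ≤ 30)) = 0 := by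
          simp only [List.length_cons, List.take_succ_cons, List.map_cons, prefixSumsB,
            List.countP_cons, hz]
          simp; omega
        rw [hcount]
        simp [solLoopA, h]
      · have hle : (soma + |a - 3| : Int) ≤ 30 := by omega
        have hcount : (prefixSumsB (((a :: as).take (c :: cs).length).map (fun a => |a - 3|)) soma).countP (fun s => decide (s ≤ 30))
            = (prefixSumsB ((as.take cs.length).map (fun a => |a - 3|)) (soma + |a - 3|)).countP (fun s => decide (s ≤ 30)) + 1 := by
          simp only [List.length_cons, List.take_succ_cons, List.map_cons, prefixSumsB,
            List.countP_cons]
          simp [hle]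
        rw [hcount]
        simp only [solLoopA, h, if_false]
        rw [ih]
        simp only [List.take_succ_cons, List.drop_succ_cons, List.map_cons]
        refine Prod.ext ?_ rfl
        show (if PySem.Chars.islower c then
                msg.push (if c = 'z' then 'a' else Char.ofNat (c.toNat + 1))
              else msg.push c) ++ _ = _
        have : (if PySem.Chars.islower c then
                msg.push (if c = 'z' then 'a' else Char.ofNat (c.toNat + 1))
              else msg.push c) = msg.push (shiftTableB c) := by
          rw [← transform_eq]
          by_cases hl : PySem.Chars.islower c <;> simp [hl]
        rw [this]
        apply String.ext
        simp

-- ===== VERDICT =====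
theorem solution_spec : Claim_equal_solution := by
  intro arr text _
  unfold Spec_solution solution solution_alt
  rw [solLoopA_eq]
  apply Prod.ext
  · apply String.ext; simp
  · rfl
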